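-- pv_equiv track=rewrite | github.com/dulinnan/compsci_assign1 | misplaced_letter.py | get_number_correct_not_in_place
-- ===== SOURCE A (Python) =====
-- def get_string_without_matches(letters_to_check, letters):
--     non_matched_strings = ""
--     i = 0
--     while i < len(letters):
--         if letters[i] != letters_to_check[i]:
--             non_matched_strings += letters_to_check[i]
--         else:
--             non_matched_strings += " "
--         i += 1
--     return non_matched_strings
--
-- def get_number_correct_not_in_place(hidden_letters, user_letters):
--     counter = 0
--     non_matching_hidden_letters = get_string_without_matches(
--         hidden_letters, user_letters)
--     non_repetitive_user_letters = ""
--     non_repetitive_non_matching_hidden_letters = ""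
--     iterated_letter_user = ""
--     iterated_letter_hidden = ""
--     for letter in user_letters:  # remove duplicates and replace with space
--         if iterated_letter_user.find(letter) == -1:
--             iterated_letter_user += letter
--             non_repetitive_user_letters += letter
--         else:
--             non_repetitive_user_letters += " "
--     for letter in non_matching_hidden_letters:  # remove duplicates and replace with space
--         if iterated_letter_hidden.find(letter) == -1:
--             iterated_letter_hidden += letter
--             non_repetitive_non_matching_hidden_letters += letter
--         else:
--             non_repetitive_non_matching_hidden_letters += " "
--     i = 0
--     while i < len(non_repetitive_user_letters):
--         j = 0
--         while j < len(non_repetitive_non_matching_hidden_letters):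
--             if (non_repetitive_user_letters[i] == non_repetitive_non_matching_hidden_letters[j] and i != j and non_repetitive_user_letters[i] != " "):
--                 counter += 1
--             j += 1
--         i += 1
--     return counter
-- ===== SOURCE B (Python) =====
-- def get_number_correct_not_in_place(hidden_letters, user_letters):
--     # One pass to collect hidden letters at mismatched positions, one pass
--     # over the distinct user letters; O(n) instead of A's nested scans.
--     misplaced = set()
--     for j in range(len(user_letters)):
--         if hidden_letters[j] != user_letters[j]:
--             misplaced.add(hidden_letters[j])
--     count = 0
--     for c in set(user_letters):
--         if c != " " and c in misplaced:
--             count += 1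
--     return count
-- ===== Notes on version B (the rewrite author's own statement) =====
-- stated objective: faster
-- what changed: A builds space-padded dedup strings and counts matches with two nested index scans (plus linear 'find' scans while deduplicating); B makes one pass collecting the set of hidden letters at mismatched positions and one pass over the distinct user letters, testing set membership.
import Mathlib
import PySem

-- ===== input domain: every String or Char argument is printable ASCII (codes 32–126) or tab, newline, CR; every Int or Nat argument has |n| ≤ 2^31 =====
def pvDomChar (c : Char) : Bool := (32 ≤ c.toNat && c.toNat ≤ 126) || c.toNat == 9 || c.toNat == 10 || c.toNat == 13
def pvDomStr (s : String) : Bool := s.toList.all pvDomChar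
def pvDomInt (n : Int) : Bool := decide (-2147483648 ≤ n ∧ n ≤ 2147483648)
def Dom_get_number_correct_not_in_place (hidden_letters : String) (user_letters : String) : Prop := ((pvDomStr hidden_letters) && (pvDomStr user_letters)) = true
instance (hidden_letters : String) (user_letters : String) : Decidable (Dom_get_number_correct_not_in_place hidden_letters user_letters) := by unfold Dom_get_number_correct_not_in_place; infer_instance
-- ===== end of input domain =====

-- B replaces A's quadratic nested index scans over space-padded dedup strings by two
-- linear passes using a set of mismatched hidden letters (objective: faster).


-- ===== PORT A =====
-- get_string_without_matches: 'while i < len(letters)' ported as a fold over the index range;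
-- letters_to_check[i] (in range under Pre_) ported with pyGetD.
def pvGetStringWithoutMatches (letters_to_check : List Char) (letters : List Char) : List Char :=
  (PySem.List.pyRange 0 (PySem.List.len letters) 1).foldl
    (fun acc i =>
      if PySem.List.pyGetD letters i ' ' ≠ PySem.List.pyGetD letters_to_check i ' ' then
        acc ++ [PySem.List.pyGetD letters_to_check i ' ']
      else
        acc ++ [' ']) []

-- A's two duplicate-removal loops: state = (iterated_letters, non_repetitive_letters);
-- Python's 'iterated.find(letter) == -1' is the single-character non-membership test.
def pvDedupSpace (s : List Char) : List Char :=
  (s.foldl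
    (fun (st : List Char × List Char) letter =>
      if letter ∈ st.1 then (st.1, st.2 ++ [' '])
      else (st.1 ++ [letter], st.2 ++ [letter]))
    ([], [])).2

def get_number_correct_not_in_place (hidden_letters : String) (user_letters : String) : Int :=
  let u := user_letters.toList
  let non_matching_hidden_letters := pvGetStringWithoutMatches hidden_letters.toList u
  let non_repetitive_user_letters := pvDedupSpace u
  let non_repetitive_non_matching_hidden_letters := pvDedupSpace non_matching_hidden_letters
  (PySem.List.pyRange 0 (PySem.List.len non_repetitive_user_letters) 1).foldl
    (fun counter i =>
      (PySem.List.pyRange 0 (PySem.List.len non_repetitive_non_matching_hidden_letters) 1).foldl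
        (fun counter j =>
          if PySem.List.pyGetD non_repetitive_user_letters i ' ' =
               PySem.List.pyGetD non_repetitive_non_matching_hidden_letters j ' ' ∧
             i ≠ j ∧ PySem.List.pyGetD non_repetitive_user_letters i ' ' ≠ ' ' then
            counter + 1
          else counter)
        counter)
    0

-- ===== PORT B =====
def get_number_correct_not_in_place_alt (hidden_letters : String) (user_letters : String) : Int :=
  let h := hidden_letters.toList
  let u := user_letters.toList
  -- misplaced = set of hidden letters at mismatched positions (hidden[j] in range under Pre_)
  let misplaced : PySem.Set Char :=
    (PySem.List.pyRange 0 (PySem.List.len u) 1).foldl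
      (fun s j =>
        if PySem.List.pyGetD h j ' ' ≠ PySem.List.pyGetD u j ' ' then
          PySem.Set.add s (PySem.List.pyGetD h j ' ')
        else s)
      PySem.Set.empty
  -- count the distinct non-space user letters that occur misplaced (order-independent set consumption)
  (PySem.Set.ofList u).foldl
    (fun count c => if c ≠ ' ' ∧ PySem.Set.contains misplaced c then count + 1 else count) 0

-- ===== PRECONDITION & SPEC =====
-- Pre_ excludes exactly the inputs where Python A raises IndexError: indexing
-- hidden_letters[i] for every i < len(user_letters) requires len(user) ≤ len(hidden).
def Pre_get_number_correct_not_in_place (hidden_letters : String) (user_letters : String) : Prop :=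
  user_letters.toList.length ≤ hidden_letters.toList.length
instance (hidden_letters : String) (user_letters : String) : Decidable (Pre_get_number_correct_not_in_place hidden_letters user_letters) := by unfold Pre_get_number_correct_not_in_place; infer_instance

def pvWitness_get_number_correct_not_in_place : String × String := ("abc", "ba")

def Spec_get_number_correct_not_in_place (hidden_letters : String) (user_letters : String) (out : Int) : Prop := out = get_number_correct_not_in_place_alt hidden_letters user_letters
instance (hidden_letters : String) (user_letters : String) (out : Int) : Decidable (Spec_get_number_correct_not_in_place hidden_letters user_letters out) := by unfold Spec_get_number_correct_not_in_place; infer_instance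

-- ===== CLAIM (what is proved, stated in full; the proofs are below) =====
def Claim_equal_get_number_correct_not_in_place : Prop := ∀ (hidden_letters : String) (user_letters : String), Dom_get_number_correct_not_in_place hidden_letters user_letters → Pre_get_number_correct_not_in_place hidden_letters user_letters → Spec_get_number_correct_not_in_place hidden_letters user_letters (get_number_correct_not_in_place hidden_letters user_letters)

-- ===== LEMMAS AND PROOFS =====

def pvACount (H U : List Char) : Int :=
  (PySem.List.pyRange 0 (PySem.List.len (pvDedupSpace U)) 1).foldl
    (fun counter i =>
      (PySem.List.pyRange 0 (PySem.List.len (pvDedupSpace (pvGetStringWithoutMatches H U))) 1).foldl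
        (fun counter j =>
          if PySem.List.pyGetD (pvDedupSpace U) i ' ' =
               PySem.List.pyGetD (pvDedupSpace (pvGetStringWithoutMatches H U)) j ' ' ∧
             i ≠ j ∧ PySem.List.pyGetD (pvDedupSpace U) i ' ' ≠ ' ' then
            counter + 1
          else counter)
        counter)
    0

def pvMisplaced (H U : List Char) : PySem.Set Char :=
  (PySem.List.pyRange 0 (PySem.List.len U) 1).foldl
    (fun s j =>
      if PySem.List.pyGetD H j ' ' ≠ PySem.List.pyGetD U j ' ' then
        PySem.Set.add s (PySem.List.pyGetD H j ' ')
      else s)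
    PySem.Set.empty

def pvBCount (H U : List Char) : Int :=
  (PySem.Set.ofList U).foldl
    (fun count c => if c ≠ ' ' ∧ PySem.Set.contains (pvMisplaced H U) c then count + 1 else count) 0

-- the common middle predicate
def pvQ (H U : List Char) (c : Char) : Bool :=
  decide (c ≠ ' ' ∧ ∃ k, k < U.length ∧ U.getD k ' ' ≠ H.getD k ' ' ∧ H.getD k ' ' = c)


lemma pvMemMisplaced (H U : List Char) (c : Char) :
    c ∈ pvMisplaced H U ↔
      ∃ k, k < U.length ∧ U.getD k ' ' ≠ H.getD k ' ' ∧ H.getD k ' ' = c := by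
  unfold pvMisplaced
  rw [PySem.List.foldl_ite_eq_foldl_filter
        (p := fun j => PySem.List.pyGetD H j ' ' ≠ PySem.List.pyGetD U j ' ')
        (f := fun s j => PySem.Set.add s (PySem.List.pyGetD H j ' ')),
      PySem.Set.mem_foldl_add]
  simp only [PySem.Set.empty, List.not_mem_nil, false_or, List.mem_filter,
    PySem.List.mem_pyRange_one, PySem.List.len_eq, decide_eq_true_eq]
  constructor
  · rintro ⟨j, ⟨⟨hj0, hjn⟩, hne⟩, hc⟩
    refine ⟨j.toNat, ?_, ?_, ?_⟩
    · omega
    · have := Int.toNat_of_nonneg hj0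
      rw [← this, PySem.List.pyGetD_natCast, PySem.List.pyGetD_natCast] at hne
      exact fun h => hne (by rw [h])
    · have := Int.toNat_of_nonneg hj0
      rw [← this, PySem.List.pyGetD_natCast] at hc
      exact hc.symm
  · rintro ⟨k, hk, hne, hc⟩
    refine ⟨(k : Int), ⟨⟨by omega, by omega⟩, ?_⟩, ?_⟩
    · rw [PySem.List.pyGetD_natCast, PySem.List.pyGetD_natCast]
      exact fun h => hne (by rw [h])
    · rw [PySem.List.pyGetD_natCast]
      exact hc.symm

lemma pvB_eq (H U : List Char) :
    pvBCount H U = ((PySem.Set.ofList U).countP (pvQ H U) : Int) := by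
  unfold pvBCount
  rw [PySem.List.foldl_ite_add_one
    (p := fun c => c ≠ ' ' ∧ PySem.Set.contains (pvMisplaced H U) c = true), zero_add]
  congr 1
  apply List.countP_congr
  intro c _
  simp only [decide_eq_true_eq, pvQ]
  rw [PySem.Set.contains_iff, pvMemMisplaced]

def pvDedupStep (st : List Char × List Char) (letter : Char) : List Char × List Char :=
  if letter ∈ st.1 then (st.1, st.2 ++ [' ']) else (st.1 ++ [letter], st.2 ++ [letter])

lemma pvDedupAux : ∀ (s seen out : List Char),
    (s.foldl pvDedupStep (seen, out)).2 =
      out ++ (List.range s.length).map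
        (fun k => if s.getD k ' ' ∈ seen ++ s.take k then ' ' else s.getD k ' ')
  | [], seen, out => by simp
  | c :: t, seen, out => by
    have hmap : ∀ seen' : List Char,
        (∀ x, x ∈ seen' ↔ x ∈ seen ∨ x = c) →
        List.map (fun k => if t.getD k ' ' ∈ seen' ++ t.take k then ' ' else t.getD k ' ')
            (List.range t.length) =
          List.map ((fun k => if (c :: t).getD k ' ' ∈ seen ++ (c :: t).take k then ' '
              else (c :: t).getD k ' ') ∘ Nat.succ) (List.range t.length) := by
      intro seen' hs
      apply List.map_congr_left
      intro k _
      simp only [Function.comp, List.getD_cons_succ, List.take_succ_cons]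
      have : (t.getD k ' ' ∈ seen' ++ t.take k) ↔ (t.getD k ' ' ∈ seen ++ c :: t.take k) := by
        have h2 := hs (t.getD k ' ')
        simp only [List.mem_append, List.mem_cons] at h2 ⊢
        tauto
      by_cases hm : t.getD k ' ' ∈ seen' ++ t.take k
      · rw [if_pos hm, if_pos (this.mp hm)]
      · rw [if_neg hm, if_neg (fun h => hm (this.mpr h))]
    simp only [List.foldl_cons, pvDedupStep]
    by_cases hc : c ∈ seen
    · rw [if_pos hc, pvDedupAux t seen (out ++ [' '])]
      simp only [List.length_cons, List.range_succ_eq_map, List.map_cons,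
        List.getD_cons_zero, List.take_zero, List.append_nil, if_pos hc,
        List.append_assoc, List.singleton_append, List.map_map]
      congr 2
      exact hmap seen (by intro x; exact ⟨Or.inl, fun h => h.elim id (fun h2 => h2 ▸ hc)⟩)
    · rw [if_neg hc, pvDedupAux t (seen ++ [c]) (out ++ [c])]
      simp only [List.length_cons, List.range_succ_eq_map, List.map_cons,
        List.getD_cons_zero, List.take_zero, List.append_nil, if_neg hc,
        List.append_assoc, List.singleton_append, List.map_map]
      have := hmap (seen ++ [c]) (by intro x; simp)
      simp only [List.append_assoc, List.singleton_append] at this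
      rw [this]

lemma pvGsm_eq (h u : List Char) :
    pvGetStringWithoutMatches h u =
      (List.range u.length).map
        (fun k => if u.getD k ' ' ≠ h.getD k ' ' then h.getD k ' ' else ' ') := by
  unfold pvGetStringWithoutMatches
  rw [show (fun (acc : List Char) (i : Int) =>
        if PySem.List.pyGetD u i ' ' ≠ PySem.List.pyGetD h i ' ' then
          acc ++ [PySem.List.pyGetD h i ' '] else acc ++ [' ']) =
      (fun acc i => acc ++ [if PySem.List.pyGetD u i ' ' ≠ PySem.List.pyGetD h i ' ' then
          PySem.List.pyGetD h i ' ' else ' ']) from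
    funext fun acc => funext fun i => by split <;> rfl]
  rw [PySem.List.foldl_append_singleton_eq_map, PySem.List.pyRange_one]
  simp [List.map_map, Function.comp, PySem.List.len]

lemma pvDedupSpace_eq (s : List Char) :
    pvDedupSpace s =
      (List.range s.length).map
        (fun k => if s.getD k ' ' ∈ s.take k then ' ' else s.getD k ' ') := by
  show (s.foldl pvDedupStep ([], [])).2 = _
  rw [pvDedupAux s [] []]
  simp


def pvNm (H U : List Char) : List Char :=
  (List.range U.length).map (fun k => if U.getD k ' ' ≠ H.getD k ' ' then H.getD k ' ' else ' ')

def pvDu (U : List Char) : List Char :=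
  (List.range U.length).map (fun k => if U.getD k ' ' ∈ U.take k then ' ' else U.getD k ' ')

def pvDh (H U : List Char) : List Char :=
  (List.range (pvNm H U).length).map
    (fun k => if (pvNm H U).getD k ' ' ∈ (pvNm H U).take k then ' ' else (pvNm H U).getD k ' ')

lemma pvNm_len (H U : List Char) : (pvNm H U).length = U.length := by simp [pvNm]
lemma pvDu_len (U : List Char) : (pvDu U).length = U.length := by simp [pvDu]
lemma pvDh_len (H U : List Char) : (pvDh H U).length = U.length := by simp [pvDh, pvNm]

lemma pvDu_getD (U : List Char) (i : Nat) (hi : i < U.length) :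
    (pvDu U).getD i ' ' = if U.getD i ' ' ∈ U.take i then ' ' else U.getD i ' ' :=
  PySem.List.getD_map_range _ _ _ _ hi

lemma pvNm_getD (H U : List Char) (k : Nat) (hk : k < U.length) :
    (pvNm H U).getD k ' ' = if U.getD k ' ' ≠ H.getD k ' ' then H.getD k ' ' else ' ' :=
  PySem.List.getD_map_range _ _ _ _ hk

lemma pvDh_getD (H U : List Char) (k : Nat) (hk : k < U.length) :
    (pvDh H U).getD k ' ' =
      if (pvNm H U).getD k ' ' ∈ (pvNm H U).take k then ' ' else (pvNm H U).getD k ' ' :=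
  PySem.List.getD_map_range _ _ _ _ (by rw [pvNm_len]; exact hk)

lemma pvMem_nm (H U : List Char) (c : Char) (hc : c ≠ ' ') :
    c ∈ pvNm H U ↔ ∃ k, k < U.length ∧ U.getD k ' ' ≠ H.getD k ' ' ∧ H.getD k ' ' = c := by
  unfold pvNm
  simp only [List.mem_map, List.mem_range]
  constructor
  · rintro ⟨k, hk, hv⟩
    by_cases hne : U.getD k ' ' ≠ H.getD k ' '
    · rw [if_pos hne] at hv; exact ⟨k, hk, hne, hv⟩
    · rw [if_neg hne] at hv; exact absurd hv.symm hc
  · rintro ⟨k, hk, hne, hv⟩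
    exact ⟨k, hk, by rw [if_pos hne]; exact hv⟩

lemma pvCountFirst : ∀ (l : List Char) (c : Char),
    (List.range l.length).countP (fun j => decide (l.getD j ' ' = c ∧ c ∉ l.take j)) =
      if c ∈ l then 1 else 0
  | [], c => by simp
  | a :: t, c => by
    rw [List.length_cons, List.range_succ_eq_map, List.countP_cons, List.countP_map]
    by_cases ha : a = c
    · subst ha
      have h0 : (List.range t.length).countP
          ((fun j => decide ((a :: t).getD j ' ' = a ∧ a ∉ (a :: t).take j)) ∘ Nat.succ) = 0 := by
        rw [List.countP_eq_zero]
        intro k _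
        simp [List.take_succ_cons]
      simp
    · have hc : (List.range t.length).countP
          ((fun j => decide ((a :: t).getD j ' ' = c ∧ c ∉ (a :: t).take j)) ∘ Nat.succ) =
          (List.range t.length).countP (fun j => decide (t.getD j ' ' = c ∧ c ∉ t.take j)) := by
        apply List.countP_congr
        intro k _
        simp only [Function.comp, List.getD_cons_succ, List.take_succ_cons, List.mem_cons,
          decide_eq_true_eq]
        constructor
        · rintro ⟨h1, h2⟩; exact ⟨h1, fun hm => h2 (Or.inr hm)⟩
        · rintro ⟨h1, h2⟩
          refine ⟨h1, ?_⟩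
          rintro (h | h)
          · exact ha h.symm
          · exact h2 h
      rw [hc, pvCountFirst t c]
      simp [ha, Ne.symm ha]

lemma pvCountFirstOcc : ∀ (l : List Char) (p : Char → Bool),
    (List.range l.length).countP
        (fun i => decide (l.getD i ' ' ∉ l.take i) && p (l.getD i ' ')) =
      (PySem.Set.ofList l).countP p
  | [], p => by simp
  | a :: t, p => by
    rw [List.length_cons, List.range_succ_eq_map, List.countP_cons, List.countP_map,
      PySem.Set.ofList_cons, List.countP_cons]
    have htail : (List.range t.length).countP
        ((fun i => decide ((a :: t).getD i ' ' ∉ (a :: t).take i) && p ((a :: t).getD i ' ')) ∘ Nat.succ) =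
        (List.range t.length).countP
          (fun i => decide (t.getD i ' ' ∉ t.take i) && (fun c => decide (c ≠ a) && p c) (t.getD i ' ')) := by
      apply List.countP_congr
      intro k _
      simp only [Function.comp, List.getD_cons_succ, List.take_succ_cons, List.mem_cons,
        Bool.and_eq_true, decide_eq_true_eq, ne_eq]
      tauto
    have hdisc : (PySem.Set.ofList t).countP (fun c => decide (c ≠ a) && p c) =
        ((PySem.Set.ofList t).discard a).countP p := by
      rw [PySem.Set.discard, List.countP_filter]
      apply List.countP_congr
      intro x _
      simp [Bool.and_comm]
    rw [htail, pvCountFirstOcc t (fun c => decide (c ≠ a) && p c), hdisc]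
    simp

-- the double index loop of A, as a sum of per-row match counts
lemma pvDouble (du dh : List Char) :
    (PySem.List.pyRange 0 (PySem.List.len du) 1).foldl
      (fun counter i =>
        (PySem.List.pyRange 0 (PySem.List.len dh) 1).foldl
          (fun counter j =>
            if PySem.List.pyGetD du i ' ' = PySem.List.pyGetD dh j ' ' ∧
               i ≠ j ∧ PySem.List.pyGetD du i ' ' ≠ ' ' then
              counter + 1
            else counter)
          counter)
      0 =
    ((List.range du.length).map
      (fun i => (((List.range dh.length).countP
        (fun k => decide (du.getD i ' ' = dh.getD k ' ' ∧ i ≠ k ∧ du.getD i ' ' ≠ ' '))) : Int))).sum := by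
  rw [PySem.List.foldl_congr_mem _ _
    (fun counter i => counter +
      (((PySem.List.pyRange 0 (PySem.List.len dh) 1).countP
        (fun j => decide (PySem.List.pyGetD du i ' ' = PySem.List.pyGetD dh j ' ' ∧
          i ≠ j ∧ PySem.List.pyGetD du i ' ' ≠ ' '))) : Int)) 0
    (fun acc i _ => PySem.List.foldl_ite_add_one _ _ acc)]
  rw [PySem.List.foldl_add, zero_add, PySem.List.pyRange_one 0 (PySem.List.len du), List.map_map]
  simp only [PySem.List.len_eq, Int.sub_zero, Int.toNat_natCast]
  apply congrArg
  apply List.map_congr_left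
  intro i hi
  simp only [Function.comp, zero_add, PySem.List.pyGetD_natCast]
  congr 1
  rw [PySem.List.pyRange_one 0 (dh.length : Int), List.countP_map]
  simp only [Int.sub_zero, Int.toNat_natCast]
  apply List.countP_congr
  intro k _
  simp only [Function.comp, zero_add, PySem.List.pyGetD_natCast, decide_eq_true_eq, ne_eq,
    Nat.cast_inj]

-- row i of A's final loop counts 1 exactly when U[i] is a first occurrence, non-space,
-- and occurs somewhere mismatched in H
lemma pvPerIndex (H U : List Char) (i : Nat) (hi : i < U.length) :
    (((List.range (pvDh H U).length).countP
      (fun k => decide ((pvDu U).getD i ' ' = (pvDh H U).getD k ' ' ∧ i ≠ k ∧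
        (pvDu U).getD i ' ' ≠ ' '))) : Int) =
      if decide (U.getD i ' ' ∉ U.take i) && pvQ H U (U.getD i ' ') then 1 else 0 := by
  by_cases hsp : (pvDu U).getD i ' ' = ' '
  · rw [List.countP_eq_zero.mpr
      (by intro k _; simp only [decide_eq_true_eq]; exact fun h => h.2.2 hsp)]
    rw [pvDu_getD U i hi] at hsp
    by_cases hmem : U.getD i ' ' ∈ U.take i
    · rw [decide_eq_false (not_not_intro hmem), Bool.false_and, if_neg (by simp)]
      rfl
    · rw [if_neg hmem] at hsp
      have hq : pvQ H U (U.getD i ' ') = false := by unfold pvQ; rw [hsp]; simp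
      rw [hq, Bool.and_false, if_neg (by simp)]
      rfl
  · have hmem : U.getD i ' ' ∉ U.take i := by
      intro hmem; rw [pvDu_getD U i hi, if_pos hmem] at hsp; exact hsp rfl
    have hval : (pvDu U).getD i ' ' = U.getD i ' ' := by
      rw [pvDu_getD U i hi, if_neg hmem]
    have hc : U.getD i ' ' ≠ ' ' := by rw [← hval]; exact hsp
    have hcong : (List.range (pvDh H U).length).countP
        (fun k => decide ((pvDu U).getD i ' ' = (pvDh H U).getD k ' ' ∧ i ≠ k ∧
          (pvDu U).getD i ' ' ≠ ' ')) =
        (List.range (pvNm H U).length).countP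
          (fun k => decide ((pvNm H U).getD k ' ' = U.getD i ' ' ∧
            U.getD i ' ' ∉ (pvNm H U).take k)) := by
      rw [show (pvDh H U).length = (pvNm H U).length by rw [pvDh_len, pvNm_len]]
      apply List.countP_congr
      intro k hk
      rw [List.mem_range, pvNm_len] at hk
      rw [hval]
      simp only [decide_eq_true_eq]
      constructor
      · rintro ⟨h1, _, _⟩
        rw [pvDh_getD H U k hk] at h1
        by_cases ht : (pvNm H U).getD k ' ' ∈ (pvNm H U).take k
        · rw [if_pos ht] at h1; exact absurd h1 hc
        · rw [if_neg ht] at h1; exact ⟨h1.symm, by rw [← h1] at ht; exact ht⟩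
      · rintro ⟨h1, h2⟩
        have hne : i ≠ k := by
          intro hik
          have hkk := pvNm_getD H U k hk
          rw [h1] at hkk
          by_cases hne2 : U.getD k ' ' ≠ H.getD k ' '
          · rw [if_pos hne2] at hkk
            rw [← hik] at hne2 hkk
            exact hne2 hkk
          · rw [if_neg hne2] at hkk; exact hc hkk
        refine ⟨?_, hne, hc⟩
        rw [pvDh_getD H U k hk, if_neg (by rw [h1]; exact h2), h1]
    rw [hcong, pvCountFirst (pvNm H U) (U.getD i ' ')]
    have hQ : pvQ H U (U.getD i ' ') = decide (U.getD i ' ' ∈ pvNm H U) := by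
      simp only [pvQ, pvMem_nm H U _ hc, hc, ne_eq, not_false_eq_true, true_and]
    rw [hQ]
    simp only [hmem, not_false_eq_true, decide_true, Bool.true_and]
    by_cases hmn : U.getD i ' ' ∈ pvNm H U <;> simp

lemma pvA_eq (H U : List Char) :
    pvACount H U = ((PySem.Set.ofList U).countP (pvQ H U) : Int) := by
  unfold pvACount
  rw [pvGsm_eq, pvDedupSpace_eq U, pvDedupSpace_eq]
  rw [show (List.range U.length).map
        (fun k => if U.getD k ' ' ≠ H.getD k ' ' then H.getD k ' ' else ' ') = pvNm H U from rfl]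
  rw [show (List.range (pvNm H U).length).map
        (fun k => if (pvNm H U).getD k ' ' ∈ (pvNm H U).take k then ' '
          else (pvNm H U).getD k ' ') = pvDh H U from rfl]
  rw [show (List.range U.length).map
        (fun k => if U.getD k ' ' ∈ U.take k then ' ' else U.getD k ' ') = pvDu U from rfl]
  rw [pvDouble (pvDu U) (pvDh H U)]
  rw [List.map_congr_left (fun i hi =>
    pvPerIndex H U i (by rw [List.mem_range, pvDu_len] at hi; exact hi))]
  rw [pvDu_len, PySem.List.sum_map_ite_one_zero]
  congr 1
  rw [← pvCountFirstOcc U (pvQ H U)]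

-- ===== VERDICT (by name: the statement is the Claim_ definition above) =====
theorem get_number_correct_not_in_place_spec : Claim_equal_get_number_correct_not_in_place := by
  intro hidden_letters user_letters _hdom _hpre
  unfold Spec_get_number_correct_not_in_place
  have hA : get_number_correct_not_in_place hidden_letters user_letters =
      pvACount hidden_letters.toList user_letters.toList := rfl
  have hB : get_number_correct_not_in_place_alt hidden_letters user_letters =
      pvBCount hidden_letters.toList user_letters.toList := rfl
  rw [hA, hB, pvA_eq, pvB_eq]
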